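-- pv_equiv track=rewrite | github.com/antoinekoehl/omnilib-ml | nabstab/interpretability/sis_clustering.py | exact_match_cluster
-- ===== SOURCE A (Python) =====
-- from collections import Counter, defaultdict
-- from typing import Dict, List, Set, Tuple
--
-- SISSet = List[Tuple[int, str]]  # List of (position, amino_acid) tuples
--
-- SISSignature = Tuple[Tuple[int, str], ...]  # Hashable version
--
-- def sis_set_to_signature(sis_set: SISSet) -> SISSignature:
--     """
--     Convert SIS set to hashable signature for exact-match grouping.
--
--     Args:
--         sis_set: List of (position, amino_acid) tuples
--
--     Returns:
--         Tuple of tuples, sorted by position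
--     """
--     return tuple(sorted(sis_set, key=lambda x: x[0]))
--
-- def exact_match_cluster(
--     all_sis_sets: List[SISSet]
-- ) -> Counter:
--     """
--     Group identical SIS sets and count occurrences.
--
--     This is the simplest clustering approach - just count how many times
--     each exact SIS signature appears.
--
--     Args:
--         all_sis_sets: Flat list of all SIS sets from all sequences
--
--     Returns:
--         Counter mapping SIS signature -> count
--     """
--     counts = Counter()
--     for sis_set in all_sis_sets:
--         signature = sis_set_to_signature(sis_set)
--         counts[signature] += 1
--     return counts
-- ===== SOURCE B (Python) =====
-- from collections import Counter
-- from typing import List, Tuple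
--
-- SISSet = List[Tuple[int, str]]
--
-- def sis_set_to_signature(sis_set):
--     return tuple(sorted(sis_set, key=lambda x: x[0]))
--
-- def exact_match_cluster(all_sis_sets):
--     # Partition-based grouping: repeatedly peel off the first remaining
--     # signature's whole equivalence class; no incremental per-element tally.
--     sigs = [sis_set_to_signature(s) for s in all_sis_sets]
--     counts = Counter()
--     while sigs:
--         head = sigs[0]
--         counts[head] = len([s for s in sigs if s == head])
--         sigs = [s for s in sigs if s != head]
--     return counts
-- ===== Notes on version B (the rewrite author's own statement) =====
-- stated objective: alternative
-- what changed: Replaces A's single pass of incremental Counter increments with partition-based grouping: repeatedly take the first remaining signature, emit it with the size of its whole equivalence class (one scan), and recurse on the list with that class filtered out, so no per-element dictionary accumulation happens at all.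
import Mathlib
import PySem

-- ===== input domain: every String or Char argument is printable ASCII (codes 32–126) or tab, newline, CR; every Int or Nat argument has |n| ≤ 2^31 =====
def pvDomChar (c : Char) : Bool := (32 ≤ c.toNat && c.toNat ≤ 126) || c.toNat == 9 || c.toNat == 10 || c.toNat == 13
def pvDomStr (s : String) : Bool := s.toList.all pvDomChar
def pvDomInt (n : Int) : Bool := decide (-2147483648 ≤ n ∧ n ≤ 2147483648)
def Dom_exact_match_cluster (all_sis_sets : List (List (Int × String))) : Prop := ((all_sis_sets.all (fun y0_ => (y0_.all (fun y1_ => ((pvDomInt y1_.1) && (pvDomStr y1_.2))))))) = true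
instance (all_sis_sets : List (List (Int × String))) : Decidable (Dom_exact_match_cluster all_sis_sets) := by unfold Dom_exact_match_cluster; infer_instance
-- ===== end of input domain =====

-- B replaces A's incremental Counter tallying with partition-based grouping: peel off the first
-- remaining signature's whole equivalence class per step and recurse on the filtered remainder.


-- ===== PORT A =====
-- tuple(sorted(sis_set, key=lambda x: x[0]))
def sis_set_to_signature (sis_set : List (Int × String)) : List (Int × String) :=
  PySem.List.sorted sis_set (fun x => x.1) false

def exact_match_cluster (all_sis_sets : List (List (Int × String))) : List (List (Int × String) × Int) :=
  (all_sis_sets.foldl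
    (fun counts sis_set => counts.modify (sis_set_to_signature sis_set) 0 (· + 1))
    PySem.Dict.empty).items

-- ===== PORT B =====
-- the while-loop of Source B: peel off the first signature's class, count it by one scan, recurse
def emcGo (sigs : List (List (Int × String))) : List (List (Int × String) × Int) :=
  match sigs with
  | [] => []
  | head :: tail =>
    (head, (((head :: tail).filter (fun s => s == head)).length : Int)) ::
      emcGo ((head :: tail).filter (fun s => s != head))
termination_by sigs.length
decreasing_by
  simp only [List.filter_cons, bne_self_eq_false, Bool.false_eq_true, if_false, List.length_cons]
  have := List.length_filter_le (fun s => s != head) tail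
  omega

def exact_match_cluster_alt (all_sis_sets : List (List (Int × String))) : List (List (Int × String) × Int) :=
  emcGo (all_sis_sets.map sis_set_to_signature)

-- ===== PRECONDITION & SPEC =====
def Spec_exact_match_cluster (all_sis_sets : List (List (Int × String))) (out : List (List (Int × String) × Int)) : Prop := out = exact_match_cluster_alt all_sis_sets
instance (all_sis_sets : List (List (Int × String))) (out : List (List (Int × String) × Int)) : Decidable (Spec_exact_match_cluster all_sis_sets out) := by unfold Spec_exact_match_cluster; infer_instance

-- ===== CLAIM =====
def Claim_equal_exact_match_cluster : Prop := ∀ (all_sis_sets : List (List (Int × String))), Dom_exact_match_cluster all_sis_sets → Spec_exact_match_cluster all_sis_sets (exact_match_cluster all_sis_sets)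

-- ===== LEMMAS AND PROOFS =====
-- skipping already-present elements of the accumulator does not change Set.ofList's foldl
theorem pvFoldlAdd_filter {α : Type} [BEq α] [LawfulBEq α] (t : List α) (acc : List α) (h : α)
    (hmem : h ∈ acc) :
    List.foldl PySem.Set.add acc t = List.foldl PySem.Set.add acc (t.filter (fun x => x != h)) := by
  induction t generalizing acc with
  | nil => rfl
  | cons x xs ih =>
    by_cases hx : x = h
    · subst hx
      have hskip : PySem.Set.add acc x = acc := by
        simp [PySem.Set.add, PySem.Set.contains, hmem]
      simp only [List.filter_cons, bne_self_eq_false, Bool.false_eq_true, if_false,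
        List.foldl_cons, hskip]
      exact ih acc hmem
    · have hxt : (x != h) = true := by simp [hx]
      simp only [List.filter_cons, hxt, if_true, List.foldl_cons]
      apply ih
      simp only [PySem.Set.add]
      split
      · exact hmem
      · exact List.mem_append_left _ hmem

-- an accumulator head never matched later stays at its slot through the foldl
theorem pvFoldlAdd_cons {α : Type} [BEq α] [LawfulBEq α] (t : List α) (acc : List α) (h : α)
    (hne : ∀ x ∈ t, x ≠ h) :
    List.foldl PySem.Set.add (h :: acc) t = h :: List.foldl PySem.Set.add acc t := by
  induction t generalizing acc with
  | nil => rfl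
  | cons x xs ih =>
    have hx : x ≠ h := hne x (List.mem_cons_self)
    have hcont : PySem.Set.contains (h :: acc) x = PySem.Set.contains acc x := by
      simp [PySem.Set.contains, hx]
    have hadd : PySem.Set.add (h :: acc) x = h :: PySem.Set.add acc x := by
      simp only [PySem.Set.add, hcont]
      split <;> simp
    simp only [List.foldl_cons, hadd]
    exact ih _ (fun y hy => hne y (List.mem_cons_of_mem _ hy))

theorem pvDedup_cons (h : List (Int × String)) (t : List (List (Int × String))) :
    PySem.List.dedup (h :: t)
      = h :: PySem.List.dedup (t.filter (fun x => x != h)) := by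
  simp only [PySem.List.dedup, PySem.Set.ofList, List.foldl_cons]
  have hempty : PySem.Set.add PySem.Set.empty h = [h] := rfl
  rw [hempty, pvFoldlAdd_filter t [h] h (by simp)]
  exact pvFoldlAdd_cons _ [] h (by
    intro x hx
    have := List.of_mem_filter hx
    simpa using this)

theorem emcGo_eq (sigs : List (List (Int × String))) :
    emcGo sigs = (PySem.List.dedup sigs).map (fun k => (k, (sigs.count k : Int))) := by
  match sigs with
  | [] => simp [emcGo, PySem.List.dedup, PySem.Set.ofList]
  | h :: t =>
    have ih := emcGo_eq (t.filter (fun x => x != h))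
    rw [show emcGo (h :: t)
        = (h, (((h :: t).filter (fun s => s == h)).length : Int)) ::
            emcGo ((h :: t).filter (fun s => s != h)) from by rw [emcGo]]
    rw [show (h :: t).filter (fun s => s != h) = t.filter (fun s => s != h) from by simp]
    rw [ih, pvDedup_cons, List.map_cons]
    have hc1 : ((((h :: t).filter (fun s => s == h)).length : Int))
        = (((h :: t).count h : Nat) : Int) := by
      simp [List.count_eq_countP, List.countP_eq_length_filter]
    rw [hc1]
    congr 1
    apply List.map_congr_left
    intro k hk
    have hkmem : k ∈ t.filter (fun x => x != h) :=
      (PySem.List.mem_dedup _ _).mp hk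
    have hkne : k ≠ h := by
      have := List.of_mem_filter hkmem
      simpa using this
    have hcf : (t.filter (fun x => x != h)).count k = t.count k :=
      List.count_filter (by simp [hkne])
    rw [hcf]
    simp [Ne.symm hkne]
termination_by sigs.length
decreasing_by
  have := List.length_filter_le (fun x => x != h) t
  simp only [List.length_cons]; omega

theorem exact_match_cluster_eq_counter_items (all_sis_sets : List (List (Int × String))) :
    exact_match_cluster all_sis_sets
      = (PySem.Dict.counter (all_sis_sets.map sis_set_to_signature)).items := by
  unfold exact_match_cluster
  rw [PySem.Dict.counter_eq_foldl, List.foldl_map]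

-- ===== VERDICT =====
theorem exact_match_cluster_spec : Claim_equal_exact_match_cluster := by
  intro all_sis_sets _
  unfold Spec_exact_match_cluster exact_match_cluster_alt
  rw [exact_match_cluster_eq_counter_items, PySem.Dict.items_counter, emcGo_eq]
  simp [PySem.List.dedup_eq_ofList]
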